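-- pv_equiv track=rewrite | github.com/bestisblessed/nfl-ai | Models/IN-PROGRESS/INTERCEPTIONS/odds_utils.py | normalize_player_name
-- ===== SOURCE A (Python) =====
-- def normalize_player_name(name: str) -> str:
--     """Normalize player names for resilient matching.
--
--     Lowercases, strips whitespace, squashes internal whitespace, and converts
--     common punctuation variants to spaces.
--     """
--     if name is None:
--         return ""
--     s = str(name).strip().lower()
--     for ch in ["\u2019", "'", ".", ",", "-", "\u2013", "\u2014"]:
--         s = s.replace(ch, " ")
--     parts = [p for p in s.split() if p]
--     return " ".join(parts)
-- ===== SOURCE B (Python) =====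
-- def normalize_player_name(name: str) -> str:
--     """Normalize player names: one tokenizing pass instead of seven replace
--     passes plus split."""
--     if name is None:
--         return ""
--     s = str(name).strip().lower()
--     punct = {"\u2019", "'", ".", ",", "-", "\u2013", "\u2014"}
--     tokens = []
--     buf = []
--     for ch in s:
--         if ch.isspace() or ch in punct:
--             if buf:
--                 tokens.append("".join(buf))
--                 buf = []
--         else:
--             buf.append(ch)
--     if buf:
--         tokens.append("".join(buf))
--     return " ".join(tokens)
-- ===== Notes on version B (the rewrite author's own statement) =====
-- stated objective: alternative
-- what changed: Replaced the seven serial str.replace passes plus split/join with a single character-by-character tokenizing pass that flushes a buffer at whitespace or punctuation.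
import Mathlib
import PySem

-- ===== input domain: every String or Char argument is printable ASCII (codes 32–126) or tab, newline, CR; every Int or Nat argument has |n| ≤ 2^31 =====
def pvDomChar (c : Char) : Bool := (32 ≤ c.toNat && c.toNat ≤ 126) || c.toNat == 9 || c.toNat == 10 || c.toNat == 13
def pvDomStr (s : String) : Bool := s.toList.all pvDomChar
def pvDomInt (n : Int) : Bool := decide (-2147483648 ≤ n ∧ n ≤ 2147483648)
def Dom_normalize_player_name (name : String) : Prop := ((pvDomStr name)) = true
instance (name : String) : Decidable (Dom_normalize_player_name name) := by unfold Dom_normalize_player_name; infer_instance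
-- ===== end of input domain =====

-- B replaces A's seven serial replace passes + split/join by a single tokenizing scan (objective: alternative, same result).
-- The Python-level 'if name is None' branch is unreachable under the String type and is not ported.

-- ===== PORT A =====
-- literal port of A: strip+lower, seven replace passes, split(), keep truthy parts, join
def normalize_player_name (name : String) : String :=
  let s0 := PySem.Chars.lower (PySem.Chars.strip name.toList)
  let s := ['\u2019', '\'', '.', ',', '-', '\u2013', '\u2014'].foldl
    (fun acc ch => PySem.Chars.replace acc [ch] [' ']) s0
  let parts := (PySem.Chars.split₀ s).filter (fun p => !p.isEmpty)
  String.mk (PySem.Chars.join [' '] parts)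

-- ===== PORT B =====
-- Source B's separator test: whitespace or one of the punctuation characters
def npnSep (c : Char) : Bool :=
  PySem.Chars.isspace c || c ∈ ['\u2019', '\'', '.', ',', '-', '\u2013', '\u2014']

-- the single scan of Source B: buf is the current token, toks the finished tokens
def npnScan : List Char → List Char → List (List Char) → List (List Char)
  | [], buf, toks => if buf = [] then toks else toks ++ [buf]
  | c :: rest, buf, toks =>
    if npnSep c then
      if buf = [] then npnScan rest [] toks else npnScan rest [] (toks ++ [buf])
    else npnScan rest (buf ++ [c]) toks

def normalize_player_name_alt (name : String) : String :=
  let s := PySem.Chars.lower (PySem.Chars.strip name.toList)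
  String.mk (PySem.Chars.join [' '] (npnScan s [] []))

-- ===== PRECONDITION & SPEC =====
def Spec_normalize_player_name (name : String) (out : String) : Prop := out = normalize_player_name_alt name
instance (name : String) (out : String) : Decidable (Spec_normalize_player_name name out) := by unfold Spec_normalize_player_name; infer_instance

-- ===== CLAIM (what is proved, stated in full; the proofs are below) =====
def Claim_equal_normalize_player_name : Prop := ∀ (name : String), Dom_normalize_player_name name → Spec_normalize_player_name name (normalize_player_name name)

-- ===== LEMMAS AND PROOFS =====

-- the substitution performed pointwise by A's seven replace passes
def npnSub (c : Char) : Char :=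
  if c ∈ (['\u2019', '\'', '.', ',', '-', '\u2013', '\u2014'] : List Char) then ' ' else c

theorem npn_go_single (a b : Char) : ∀ (cs : List Char) (fuel : Nat) (acc : List Char), cs.length ≤ fuel →
    PySem.Chars.replace.go [a] [b] fuel cs acc = acc.reverse ++ cs.map (fun c => if c = a then b else c) := by
  intro cs
  induction cs with
  | nil => intro fuel acc _; cases fuel <;> simp [PySem.Chars.replace.go]
  | cons c t ih =>
    intro fuel acc h
    simp only [List.length_cons] at h
    cases fuel with
    | zero => omega
    | succ k =>
      rw [PySem.Chars.replace.go]
      simp only [List.isPrefixOf, List.length_cons, List.length_nil, List.drop_succ_cons,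
        List.drop_zero, Bool.and_true]
      by_cases hca : a = c
      · subst hca
        simp [ih k (b :: acc) (by omega)]
      · have hb : (a == c) = false := by simp [hca]
        simp [hb, ih k (c :: acc) (by omega), Ne.symm hca]

theorem npn_replace_single (a b : Char) (cs : List Char) :
    PySem.Chars.replace cs [a] [b] = cs.map (fun c => if c = a then b else c) := by
  simp [PySem.Chars.replace, npn_go_single a b cs cs.length [] le_rfl]

theorem npn_foldl_replace (cs : List Char) :
    (['\u2019', '\'', '.', ',', '-', '\u2013', '\u2014'] : List Char).foldl
      (fun acc ch => PySem.Chars.replace acc [ch] [' ']) cs = cs.map npnSub := by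
  simp only [List.foldl_cons, List.foldl_nil, npn_replace_single, List.map_map]
  refine List.map_congr_left ?_
  intro c _
  by_cases hc : c ∈ (['\u2019', '\'', '.', ',', '-', '\u2013', '\u2014'] : List Char)
  · fin_cases hc <;> rfl
  · simp only [List.mem_cons, List.not_mem_nil, or_false] at hc
    push Not at hc
    obtain ⟨h1, h2, h3, h4, h5, h6, h7⟩ := hc
    simp [npnSub, Function.comp, h1, h2, h3, h4, h5, h6, h7]

theorem npn_sep_sub (c : Char) : PySem.Chars.isspace (npnSub c) = npnSep c := by
  by_cases hc : c ∈ (['\u2019', '\'', '.', ',', '-', '\u2013', '\u2014'] : List Char)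
  · fin_cases hc <;> decide
  · simp [npnSub, npnSep, hc]

theorem npn_scan_go (cs : List Char) : ∀ (buf : List Char) (toks : List (List Char)),
    npnScan cs buf toks = PySem.Chars.split₀.go (cs.map npnSub) buf.reverse toks.reverse := by
  induction cs with
  | nil =>
    intro buf toks
    rw [npnScan]
    simp only [List.map_nil]
    rw [PySem.Chars.split₀.go]
    by_cases hb : buf = [] <;> simp [hb]
  | cons c rest ih =>
    intro buf toks
    rw [npnScan]
    simp only [List.map_cons]
    rw [PySem.Chars.split₀.go, npn_sep_sub]
    by_cases hs : npnSep c
    · by_cases hb : buf = []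
      · simp [hs, hb, ih [] toks]
      · have : buf.reverse.isEmpty = false := by simp [hb]
        simp only [hs, if_true, hb, if_false, this, List.reverse_reverse]
        rw [ih [] (toks ++ [buf])]
        simp
    · have hcc : npnSub c = c := by
        simp only [npnSep, Bool.or_eq_true, decide_eq_true_eq] at hs
        push Not at hs
        simp [npnSub, hs.2]
      simp only [hs, if_false, Bool.false_eq_true, hcc]
      rw [ih (buf ++ [c]) toks]
      simp

theorem npn_go_no_empty : ∀ (cs cur : List Char) (acc : List (List Char)),
    (∀ p ∈ acc, p ≠ []) → ∀ p ∈ PySem.Chars.split₀.go cs cur acc, p ≠ [] := by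
  intro cs
  induction cs with
  | nil =>
    intro cur acc hacc p hp
    rw [PySem.Chars.split₀.go] at hp
    by_cases hc : cur.isEmpty
    · simp [hc] at hp; exact hacc p hp
    · simp [hc] at hp
      rcases hp with h | h
      all_goals first
      | exact hacc p h
      | (subst h; simpa using hc)
  | cons c rest ih =>
    intro cur acc hacc p hp
    rw [PySem.Chars.split₀.go] at hp
    by_cases hs : PySem.Chars.isspace c
    · by_cases hc : cur.isEmpty
      · simp [hs, hc] at hp; exact ih [] acc hacc p hp
      · simp [hs, hc] at hp
        refine ih [] (cur.reverse :: acc) ?_ p hp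
        intro q hq
        simp only [List.mem_cons] at hq
        rcases hq with h | h
        all_goals first
        | exact hacc q h
        | exact hacc q (by simpa using h)
        | (subst h; simpa using hc)
    · simp [hs] at hp
      exact ih (c :: cur) acc hacc p hp

theorem npn_split₀_no_empty (cs : List Char) :
    (PySem.Chars.split₀ cs).filter (fun p => !p.isEmpty) = PySem.Chars.split₀ cs := by
  rw [List.filter_eq_self]
  intro p hp
  have := npn_go_no_empty cs [] [] (by simp) p hp
  simpa using this

-- ===== VERDICT (by name: the statement is the Claim_ definition above) =====
theorem normalize_player_name_spec : Claim_equal_normalize_player_name := by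
  intro name _
  unfold Spec_normalize_player_name normalize_player_name normalize_player_name_alt
  simp only [npn_foldl_replace, npn_split₀_no_empty]
  rw [npn_scan_go]
  rfl
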